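-- pv_equiv track=rewrite | github.com/mdemore2/aoc2024 | day25/day25.py | fit_combos
-- ===== SOURCE A (Python) =====
-- def fit_combos(locks: list, keys: list) -> int:
--     num_fits = 0
--     for lock in locks:
--         for key in keys:
--             overlap = False
--             for pin in range(len(key)):
--                 total = key[pin] + lock[pin]
--                 if total > 5:
--                     overlap = True
--             if not overlap:
--                 num_fits += 1
--
--     return num_fits
-- ===== SOURCE B (Python) =====
-- def fit_combos(locks: list, keys: list) -> int:
--     # Group keys by their pin profile once, then test each distinct profile
--     # against each lock and add its multiplicity.
--     profile_count = {}
--     for key in keys: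
--         t = tuple(key)
--         profile_count[t] = profile_count.get(t, 0) + 1
--     total = 0
--     for lock in locks:
--         for prof, cnt in profile_count.items():
--             if all(p + l <= 5 for p, l in zip(prof, lock)):
--                 total += cnt
--     return total
-- ===== Notes on version B (the rewrite author's own statement) =====
-- stated objective: faster
-- what changed: B builds a dict grouping equal key pin-profiles with their multiplicities once, then tests each lock only against the distinct profiles (with an early-exiting all() over zip) and adds the multiplicity, instead of A's per-(lock,key) full pin scan with an overlap flag.
import Mathlib
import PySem

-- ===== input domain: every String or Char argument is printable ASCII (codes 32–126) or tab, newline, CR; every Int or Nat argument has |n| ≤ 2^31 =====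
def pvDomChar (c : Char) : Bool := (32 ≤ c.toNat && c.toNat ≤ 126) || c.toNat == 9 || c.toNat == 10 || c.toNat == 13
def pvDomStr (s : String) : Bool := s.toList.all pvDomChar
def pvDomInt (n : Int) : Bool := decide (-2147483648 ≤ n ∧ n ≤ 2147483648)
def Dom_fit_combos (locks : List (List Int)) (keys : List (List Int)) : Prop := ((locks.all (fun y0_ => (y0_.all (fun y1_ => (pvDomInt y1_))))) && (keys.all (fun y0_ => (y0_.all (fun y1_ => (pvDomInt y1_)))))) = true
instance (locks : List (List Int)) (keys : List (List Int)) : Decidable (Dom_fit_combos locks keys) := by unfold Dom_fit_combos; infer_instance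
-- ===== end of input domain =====

-- B groups equal key profiles in a dict built once and tests each DISTINCT profile per lock,
-- adding its multiplicity, with an early-exiting fit test (measured faster on the generated inputs).


-- ===== PORT A =====
-- key[pin] / lock[pin]: pin is always in range for key; in range for lock under Pre_
-- (pyGetD is exact there; where Python would raise IndexError, Pre_ excludes the input).
def fit_combos (locks : List (List Int)) (keys : List (List Int)) : Int :=
  locks.foldl (fun num_fits lock =>
    keys.foldl (fun num_fits key =>
      let overlap := (PySem.List.pyRange 0 (key.length : Int) 1).foldl
        (fun overlap pin =>
          if PySem.List.pyGetD key pin 0 + PySem.List.pyGetD lock pin 0 > 5 then true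
          else overlap) false
      if !overlap then num_fits + 1 else num_fits) num_fits) 0

-- ===== PORT B =====
-- Python's tuple(key) dict key is represented by the List Int itself (same contents, same equality).
def fit_combos_alt (locks : List (List Int)) (keys : List (List Int)) : Int :=
  let profile_count : PySem.Dict (List Int) Int :=
    keys.foldl (fun d t => d.insert t (d.getD t 0 + 1)) PySem.Dict.empty
  locks.foldl (fun total lock =>
    profile_count.items.foldl (fun total pc =>
      if (pc.1.zip lock).all (fun q => decide (q.1 + q.2 ≤ 5)) then total + pc.2
      else total) total) 0

-- ===== PRECONDITION & SPEC =====
-- Pre_ excludes exactly the inputs where A raises IndexError: some key longer than some lock.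
def Pre_fit_combos (locks : List (List Int)) (keys : List (List Int)) : Prop :=
  ∀ lock ∈ locks, ∀ key ∈ keys, key.length ≤ lock.length
instance (locks : List (List Int)) (keys : List (List Int)) : Decidable (Pre_fit_combos locks keys) := by unfold Pre_fit_combos; infer_instance
def pvWitness_fit_combos : List (List Int) × List (List Int) :=
  ([[0, 5, 3], [1, 1, 1]], [[5, 0, 2], [5, 5, 5]])

def Spec_fit_combos (locks : List (List Int)) (keys : List (List Int)) (out : Int) : Prop := out = fit_combos_alt locks keys
instance (locks : List (List Int)) (keys : List (List Int)) (out : Int) : Decidable (Spec_fit_combos locks keys out) := by unfold Spec_fit_combos; infer_instance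

-- ===== CLAIM (what is proved, stated in full; the proofs are below) =====
def Claim_equal_fit_combos : Prop := ∀ (locks : List (List Int)) (keys : List (List Int)), Dom_fit_combos locks keys → Pre_fit_combos locks keys → Spec_fit_combos locks keys (fit_combos locks keys)

-- ===== LEMMAS AND PROOFS =====

-- the fitting test shared by both readings: no pin of the key overlaps the lock
def pvFits (key lock : List Int) : Bool :=
  (key.zip lock).all (fun q => decide (q.1 + q.2 ≤ 5))

-- A's overlap flag is the negation of B's zip-based fit test (when the key is not longer than the lock)
theorem pv_overlap_eq (key lock : List Int) (h : key.length ≤ lock.length) :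
    (PySem.List.pyRange 0 (key.length : Int) 1).foldl
      (fun overlap pin =>
        if PySem.List.pyGetD key pin 0 + PySem.List.pyGetD lock pin 0 > 5 then true
        else overlap) false = !pvFits key lock := by
  rw [show (fun (overlap : Bool) (pin : Int) =>
        if PySem.List.pyGetD key pin 0 + PySem.List.pyGetD lock pin 0 > 5 then true
        else overlap)
      = (fun overlap pin =>
        if (fun pin => decide (PySem.List.pyGetD key pin 0 + PySem.List.pyGetD lock pin 0 > 5)) pin then true
        else overlap) from by funext o p; simp]
  rw [PySem.List.foldl_if_true_eq, PySem.List.pyRange_zero_natCast]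
  rw [Bool.eq_iff_iff]
  simp only [pvFits, Bool.false_or, List.any_map, List.any_eq_true, List.mem_range,
    Function.comp, Bool.not_eq_eq_eq_not, Bool.not_true, List.all_eq_false, decide_eq_true_eq,
    not_le, PySem.List.pyGetD_natCast]
  constructor
  · rintro ⟨i, hi, hgt⟩
    have hil : i < lock.length := by omega
    refine ⟨(key[i], lock[i]), ?_, ?_⟩
    · have hiz : i < (key.zip lock).length := by rw [List.length_zip]; omega
      have := List.getElem_mem (l := key.zip lock) (n := i) hiz
      simpa [List.getElem_zip] using this
    · rw [List.getD_eq_getElem key 0 hi, List.getD_eq_getElem lock 0 hil] at hgt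
      simpa using hgt
  · rintro ⟨q, hq, hgt⟩
    obtain ⟨i, hi, hq⟩ := List.mem_iff_getElem.mp hq
    have hik : i < key.length := by rw [List.length_zip] at hi; omega
    refine ⟨i, hik, ?_⟩
    rw [List.getD_eq_getElem key 0 hik, List.getD_eq_getElem lock 0 (by omega)]
    rw [← hq] at hgt
    simp only [List.getElem_zip] at hgt
    omega

-- summing an indicator over a Nodup list containing a yields its value at a
theorem pv_sum_zero {α : Type} [DecidableEq α] (s : List α) (a : α) (c : Int)
    (ha : a ∉ s) : (s.map (fun k => if k = a then c else 0)).sum = 0 := by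
  induction s with
  | nil => simp
  | cons b t ih =>
    simp only [List.mem_cons, not_or] at ha
    simp [List.map_cons, List.sum_cons, ih ha.2]
    intro hba; exact absurd hba.symm ha.1

theorem pv_sum_single {α : Type} [DecidableEq α] (s : List α) (a : α) (c : Int)
    (hnd : s.Nodup) (ha : a ∈ s) :
    (s.map (fun k => if k = a then c else 0)).sum = c := by
  induction s with
  | nil => simp at ha
  | cons b t ih =>
    rcases List.mem_cons.mp ha with hba | hat
    · subst hba
      have : a ∉ t := (List.nodup_cons.mp hnd).1
      simp [pv_sum_zero t a c this]
    · have hb : b ≠ a := by rintro rfl; exact (List.nodup_cons.mp hnd).1 hat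
      simp [hb, ih (List.nodup_cons.mp hnd).2 hat]

-- the grouping identity: summing count·[f] over the distinct elements is countP over the list
theorem pv_sum_ite_count (f : List Int → Bool) (s : List (List Int)) (xs : List (List Int))
    (hnd : s.Nodup) (hsub : ∀ a ∈ xs, a ∈ s) :
    (s.map (fun k => if f k then (xs.count k : Int) else 0)).sum = (xs.countP f : Int) := by
  induction xs with
  | nil => simp
  | cons a t ih =>
    have h1 : (s.map (fun k => if f k then ((a :: t).count k : Int) else 0))
        = s.map (fun k => (if f k then (t.count k : Int) else 0) + (if k = a then (if f a then (1:Int) else 0) else 0)) := by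
      apply List.map_congr_left
      intro k hk
      by_cases hka : k = a
      · subst hka; simp only [List.count_cons_self]
        push_cast
        split_ifs <;> simp
      · have hak : a ≠ k := fun h' => hka h'.symm
        simp [hka, hak]
    rw [h1, PySem.List.sum_map_add_int]
    rw [ih (fun b hb => hsub b (List.mem_cons_of_mem a hb))]
    rw [pv_sum_single s a _ hnd (hsub a List.mem_cons_self)]
    rw [List.countP_cons]
    by_cases hfa : f a = true <;> simp [hfa]

-- A's inner loop over keys counts the fitting keys
theorem pv_innerA (lock : List Int) (keys : List (List Int))
    (h : ∀ key ∈ keys, key.length ≤ lock.length) (acc : Int) :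
    keys.foldl (fun num_fits key =>
      let overlap := (PySem.List.pyRange 0 (key.length : Int) 1).foldl
        (fun overlap pin =>
          if PySem.List.pyGetD key pin 0 + PySem.List.pyGetD lock pin 0 > 5 then true
          else overlap) false
      if !overlap then num_fits + 1 else num_fits) acc
    = acc + (keys.countP (fun key => pvFits key lock) : Int) := by
  induction keys generalizing acc with
  | nil => simp
  | cons key t ih =>
    rw [List.foldl_cons]
    simp only []
    rw [pv_overlap_eq key lock (h key List.mem_cons_self)]
    rw [ih (fun k hk => h k (List.mem_cons_of_mem key hk))]
    rw [List.countP_cons]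
    cases hp : pvFits key lock <;> simp <;> ring

-- B's inner loop over the dict items adds the multiplicity of each fitting profile
theorem pv_innerB (lock : List Int) (l : List (List Int × Int)) (acc : Int) :
    l.foldl (fun total pc =>
      if (pc.1.zip lock).all (fun q => decide (q.1 + q.2 ≤ 5)) then total + pc.2
      else total) acc
    = acc + (l.map (fun pc => if pvFits pc.1 lock then pc.2 else 0)).sum := by
  induction l generalizing acc with
  | nil => simp
  | cons pc t ih =>
    rw [List.foldl_cons, ih, List.map_cons, List.sum_cons]
    simp only [pvFits]
    split <;> ring

-- ===== VERDICT (by name: the statement is the Claim_ definition above) =====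
theorem fit_combos_spec : Claim_equal_fit_combos := by
  intro locks keys _ hpre
  unfold Spec_fit_combos fit_combos fit_combos_alt
  rw [PySem.Dict.foldl_insert_getD_add_one_eq_counter]
  apply PySem.List.foldl_congr_mem
  intro acc lock hl
  rw [pv_innerA lock keys (hpre lock hl) acc]
  rw [pv_innerB lock _ acc]
  rw [PySem.Dict.items_counter, List.map_map]
  rw [show ((fun pc : List Int × Int => if pvFits pc.1 lock then pc.2 else 0) ∘
        (fun k : List Int => (k, (keys.count k : Int))))
      = (fun k => if pvFits k lock then (keys.count k : Int) else 0) from rfl]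
  rw [pv_sum_ite_count (fun k => pvFits k lock) (PySem.Set.ofList keys) keys
    (PySem.Set.nodup_ofList keys)
    (fun a ha => (PySem.Set.mem_ofList (xs := keys) (y := a)).mpr ha)]
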